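-- pv_equiv track=rewrite | github.com/hsiehr/pythonProjects | spellCheck.py | minhamming
-- ===== SOURCE A (Python) =====
-- def hammingdistance(wording, word): # wording is user input word, word is from the dictionary
--
--     count = 0
--     for indexing in range(0, len(word)):
--         if word[indexing] != wording[indexing]:
--             count = count + 1
--     return count
--
-- def minhamming(wording, dictionarylist):
--
--     count = -1 #hamming distance
--     returnlist = []
--
--     for word in dictionarylist:
--
--         if len(word) == len(wording): # Figure out if length is the same
--
--             if count < 0: # Never found a word before that's the same length
--                 count = hammingdistance(wording, word)
--                 returnlist.append(word)
--
--             elif hammingdistance(wording, word) == count: # Find another one that's the same length and add to the list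
--                 returnlist.append(word)
--
--             elif hammingdistance(wording, word) < count:
--                 returnlist.clear() # Clears all of the olds words that have a higher hamming distance
--                 returnlist.append(word)
--                 count = hammingdistance(wording, word)
--
--     return returnlist # Gives list of all words that have the minimum hamming distance
-- ===== SOURCE B (Python) =====
-- def hammingdistance(wording, word):
--     return sum(1 for a, b in zip(word, wording) if a != b)
--
-- def minhamming(wording, dictionarylist):
--     scored = [(w, hammingdistance(wording, w))
--               for w in dictionarylist if len(w) == len(wording)]
--     if not scored:
--         return []
--     m = min(d for _, d in scored)
--     return [w for w, d in scored if d == m]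
-- ===== Notes on version B (the rewrite author's own statement) =====
-- stated objective: simpler
-- what changed: Replaced the online running-minimum loop with clear/append state by a two-pass gather-then-filter: build (word, distance) pairs for same-length words once, take the min of the distances, then filter; the helper distance is computed by summing over zip instead of indexing over range.
import Mathlib
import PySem

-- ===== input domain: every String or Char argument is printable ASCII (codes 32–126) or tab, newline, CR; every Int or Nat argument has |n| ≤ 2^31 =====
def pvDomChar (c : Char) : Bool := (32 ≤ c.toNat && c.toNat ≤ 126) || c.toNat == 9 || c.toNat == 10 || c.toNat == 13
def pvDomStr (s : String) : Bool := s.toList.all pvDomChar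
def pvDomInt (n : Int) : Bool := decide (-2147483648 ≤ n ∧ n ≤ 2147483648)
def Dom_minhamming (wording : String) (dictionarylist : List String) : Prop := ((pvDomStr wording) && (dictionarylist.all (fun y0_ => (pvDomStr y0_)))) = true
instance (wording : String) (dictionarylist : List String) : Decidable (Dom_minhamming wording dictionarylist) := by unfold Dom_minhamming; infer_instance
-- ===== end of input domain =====

-- B replaces A's online running-minimum (with clear/append state) by a two-pass
-- gather-then-filter over the same-length words; objective: simpler.


-- ===== PORT A =====
-- A's hammingdistance: loop over range(0, len(word)) comparing word[i] to wording[i].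
-- Exact where minhamming calls it (equal lengths, both indexings in range).
def pvHamA (wording word : String) : Int :=
  (PySem.List.pyRange 0 (PySem.Str.len word) 1).foldl
    (fun count indexing =>
      if PySem.List.pyGet? word.toList indexing ≠ PySem.List.pyGet? wording.toList indexing
      then count + 1 else count) 0

-- A's loop body (the state is (count, returnlist))
def pvStepA (wording : String) (st : Int × List String) (word : String) : Int × List String :=
  if PySem.Str.len word == PySem.Str.len wording then
    if st.1 < 0 then (pvHamA wording word, st.2 ++ [word])
    else if pvHamA wording word == st.1 then (st.1, st.2 ++ [word])
    else if pvHamA wording word < st.1 then (pvHamA wording word, [word])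
    else st
  else st

def minhamming (wording : String) (dictionarylist : List String) : List String :=
  (dictionarylist.foldl (pvStepA wording) (-1, [])).2

-- ===== PORT B =====
-- B's hammingdistance: sum(1 for a, b in zip(word, wording) if a != b)
def pvHamB (wording word : String) : Int :=
  ((word.toList.zip wording.toList).countP (fun p => p.1 ≠ p.2) : Int)

def minhamming_alt (wording : String) (dictionarylist : List String) : List String :=
  let scored := (dictionarylist.filter
      (fun w => PySem.Str.len w == PySem.Str.len wording)).map
      (fun w => (w, pvHamB wording w))
  match PySem.List.min? (scored.map (fun p => p.2)) (fun d => d) with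
  | none => []          -- Source B's "if not scored: return []" (min? = none ↔ scored = [])
  | some m => (scored.filter (fun p => p.2 == m)).map (fun p => p.1)

-- ===== PRECONDITION & SPEC =====
def Spec_minhamming (wording : String) (dictionarylist : List String) (out : List String) : Prop := out = minhamming_alt wording dictionarylist
instance (wording : String) (dictionarylist : List String) (out : List String) : Decidable (Spec_minhamming wording dictionarylist out) := by unfold Spec_minhamming; infer_instance

-- ===== CLAIM (what is proved, stated in full; the proofs are below) =====
def Claim_equal_minhamming : Prop := ∀ (wording : String) (dictionarylist : List String), Dom_minhamming wording dictionarylist → Spec_minhamming wording dictionarylist (minhamming wording dictionarylist)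

-- ===== LEMMAS AND PROOFS =====

lemma zipcnt (u : List Char) : ∀ v : List Char, u.length = v.length →
    (List.range u.length).countP (fun k => decide (u[k]? ≠ v[k]?))
      = (u.zip v).countP (fun p => decide (p.1 ≠ p.2)) := by
  induction u with
  | nil => intro v h; simp
  | cons a u ih =>
      intro v h
      cases v with
      | nil => simp at h
      | cons b v =>
          have h' : u.length = v.length := by simpa using h
          simp only [List.length_cons, List.range_succ_eq_map, List.countP_cons,
            List.countP_map, List.zip_cons_cons, Function.comp_def,
            List.getElem?_cons_succ, List.getElem?_cons_zero]
          simp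
          simpa using ih v h'

lemma ham_eq (wording w : String) (h : (PySem.Str.len w == PySem.Str.len wording) = true) :
    pvHamA wording w = pvHamB wording w := by
  have hl : w.toList.length = wording.toList.length := by
    simpa [PySem.Str.len_eq] using h
  unfold pvHamA pvHamB
  rw [PySem.Str.len_eq]
  rw [PySem.List.foldl_ite_add_one]
  rw [PySem.List.pyRange_zero_nat]
  simp only [List.countP_map, Function.comp_def, PySem.List.pyGet?_natCast]
  rw [zipcnt w.toList wording.toList hl]
  simp

def pvSame (wording w : String) : Bool := PySem.Str.len w == PySem.Str.len wording

def pvMinD (wording : String) (l : List String) (c : Int) : Int :=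
  l.foldl (fun m w => if pvSame wording w then min m (pvHamA wording w) else m) c

lemma pvMinD_cons (wording : String) (w : String) (l : List String) (c : Int) :
    pvMinD wording (w :: l) c
      = pvMinD wording l (if pvSame wording w then min c (pvHamA wording w) else c) := by
  simp only [pvMinD, List.foldl_cons]

lemma pvMinD_le (wording : String) (l : List String) : ∀ c, pvMinD wording l c ≤ c := by
  induction l with
  | nil => intro c; simp [pvMinD]
  | cons w l ih =>
      intro c
      rw [pvMinD_cons]
      refine le_trans (ih _) ?_
      split <;> simp

lemma pvHamA_nonneg (wording w : String) (h : pvSame wording w = true) :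
    0 ≤ pvHamA wording w := by
  rw [ham_eq wording w (by simpa [pvSame] using h)]
  exact Int.natCast_nonneg _

lemma loop_go (wording : String) (l : List String) : ∀ (c : Int) (acc : List String), 0 ≤ c →
    l.foldl (pvStepA wording) (c, acc)
      = (pvMinD wording l c,
         (if pvMinD wording l c < c then [] else acc)
           ++ (l.filter (pvSame wording)).filter
                (fun w => pvHamA wording w == pvMinD wording l c)) := by
  induction l with
  | nil => intro c acc hc; simp [pvMinD]
  | cons w l ih =>
      intro c acc hc
      rw [List.foldl_cons, pvMinD_cons]
      by_cases hs : pvSame wording w = true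
      · have hnn := pvHamA_nonneg wording w hs
        have hstep : pvStepA wording (c, acc) w =
            if pvHamA wording w == c then (c, acc ++ [w])
            else if pvHamA wording w < c then (pvHamA wording w, [w])
            else (c, acc) := by
          simp only [pvStepA, pvSame] at hs ⊢
          rw [if_pos hs, if_neg (by omega)]
        rw [hstep, hs, if_pos rfl, List.filter_cons_of_pos hs, List.filter_cons]
        by_cases h1 : pvHamA wording w = c
        · rw [if_pos (by simpa using h1)]
          have hmin : min c (pvHamA wording w) = c := by omega
          rw [hmin, ih c (acc ++ [w]) hc]
          have hle := pvMinD_le wording l c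
          rcases lt_or_eq_of_le hle with hlt | heq
          · have hne : (pvHamA wording w == pvMinD wording l c) = false := by
              simp only [beq_eq_false_iff_ne]; omega
            simp [hlt, hne]
          · simp [heq, h1]
        · rw [if_neg (by simpa using h1)]
          by_cases h2 : pvHamA wording w < c
          · rw [if_pos h2]
            have hmin : min c (pvHamA wording w) = pvHamA wording w := by omega
            rw [hmin, ih (pvHamA wording w) [w] hnn]
            have hle := pvMinD_le wording l (pvHamA wording w)
            have hltc : pvMinD wording l (pvHamA wording w) < c := by omega
            rw [if_pos hltc]
            rcases lt_or_eq_of_le hle with hlt | heq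
            · have hne : (pvHamA wording w == pvMinD wording l (pvHamA wording w)) = false := by
                simp only [beq_eq_false_iff_ne]; omega
              simp [hlt, hne]
            · simp [heq]
          · rw [if_neg h2]
            have hmin : min c (pvHamA wording w) = c := by omega
            rw [hmin, ih c acc hc]
            have hle := pvMinD_le wording l c
            have hne : (pvHamA wording w == pvMinD wording l c) = false := by
              simp only [beq_eq_false_iff_ne]; omega
            simp [hne]
      · have hstep : pvStepA wording (c, acc) w = (c, acc) := by
          simp only [pvStepA, pvSame] at hs ⊢
          rw [if_neg hs]
        rw [hstep, List.filter_cons_of_neg hs]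
        have : (if pvSame wording w = true then min c (pvHamA wording w) else c) = c := by
          simp [hs]
        rw [this, ih c acc hc]

lemma pvMinD_filter (wording : String) (l : List String) (c : Int) :
    pvMinD wording l c
      = (l.filter (pvSame wording)).foldl (fun m w => min m (pvHamA wording w)) c := by
  rw [List.foldl_filter]
  rfl

lemma loop_start (wording : String) (l : List String) :
    (l.foldl (pvStepA wording) (-1, [])).2 =
      match l.filter (pvSame wording) with
      | [] => []
      | w0 :: ws =>
          (w0 :: ws).filter
            (fun w => pvHamA wording w ==
              ws.foldl (fun m v => min m (pvHamA wording v)) (pvHamA wording w0)) := by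
  induction l with
  | nil => simp
  | cons w l ih =>
      rw [List.foldl_cons]
      by_cases hs : pvSame wording w = true
      · have hnn := pvHamA_nonneg wording w hs
        have hstep : pvStepA wording (-1, []) w = (pvHamA wording w, [w]) := by
          simp only [pvStepA, pvSame] at hs ⊢
          rw [if_pos hs, if_pos (by omega)]
          simp
        rw [hstep, loop_go wording l (pvHamA wording w) [w] hnn,
            List.filter_cons_of_pos hs]
        rcases lt_or_eq_of_le (pvMinD_le wording l (pvHamA wording w)) with hlt | heq
        · have hne : (pvHamA wording w == pvMinD wording l (pvHamA wording w)) = false := by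
            simp only [beq_eq_false_iff_ne]; omega
          simp [← pvMinD_filter, hne, hlt]
        · simp [← pvMinD_filter, heq]
      · have hstep : pvStepA wording (-1, []) w = (-1, []) := by
          simp only [pvStepA, pvSame] at hs ⊢
          rw [if_neg hs]
        rw [hstep, List.filter_cons_of_neg hs]
        exact ih

theorem final (wording : String) (l : List String) :
    minhamming wording l = minhamming_alt wording l := by
  unfold minhamming minhamming_alt
  rw [loop_start]
  have hfe : (fun w => PySem.Str.len w == PySem.Str.len wording) = pvSame wording := rfl
  rw [hfe]
  cases hS : l.filter (pvSame wording) with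
  | nil => rfl
  | cons w0 ws =>
      have hmem : ∀ v ∈ w0 :: ws, pvSame wording v = true := by
        intro v hv
        have : v ∈ l.filter (pvSame wording) := by rw [hS]; exact hv
        exact (List.mem_filter.mp this).2
      have hB : ∀ v ∈ w0 :: ws, pvHamB wording v = pvHamA wording v := by
        intro v hv; exact (ham_eq wording v (hmem v hv)).symm
      simp only [List.map_cons, List.map_map]
      rw [PySem.List.min?_id_cons]
      simp only [Function.comp_def]
      have hMs : (List.map (fun w => pvHamB wording w) ws).foldl min (pvHamB wording w0)
          = ws.foldl (fun m v => min m (pvHamA wording v)) (pvHamA wording w0) := by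
        rw [List.foldl_map, ham_eq wording w0 (hmem w0 (List.mem_cons_self ..))]
        exact PySem.List.foldl_congr_mem' ws _ _ _ (fun v hv m => by
          rw [ham_eq wording v (hmem v (List.mem_cons_of_mem _ hv))])
      rw [hMs]
      set M := List.foldl (fun m v => min m (pvHamA wording v)) (pvHamA wording w0) ws with hMdef
      have hw0 : pvHamB wording w0 = pvHamA wording w0 := hB w0 (List.mem_cons_self ..)
      have hws : List.map (fun p => (p.1 : String)) (List.filter (fun p => p.2 == M)
            (List.map (fun w => (w, pvHamB wording w)) ws))
          = List.filter (fun w => pvHamA wording w == M) ws := by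
        rw [List.filter_map]
        have hcg : List.filter ((fun p => p.2 == M) ∘ (fun w => (w, pvHamB wording w))) ws
            = List.filter (fun w => pvHamA wording w == M) ws :=
          List.filter_congr (fun x hx => by
            simp only [Function.comp_def]
            rw [hB x (List.mem_cons_of_mem _ hx)])
        rw [hcg, List.map_map]
        simp [Function.comp_def]
      rw [hw0, List.filter_cons, List.filter_cons]
      by_cases hc : (pvHamA wording w0 == M) = true
      · rw [if_pos hc, if_pos hc, List.map_cons, hws]
      · rw [if_neg (by simpa using hc), if_neg (by simpa using hc), hws]

-- ===== VERDICT (by name: the statement is the Claim_ definition above) =====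
theorem minhamming_spec : Claim_equal_minhamming := by
  intro wording dictionarylist _
  unfold Spec_minhamming
  exact final wording dictionarylist
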